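-- pv_equiv track=rewrite | github.com/MeowKJ/maimai-bot | src/utils/common_utils.py | get_version_name
-- ===== SOURCE A (Python) =====
-- versions = [
--     {id: 0, "title": "maimai", "version": 10000},
--     {id: 1, "title": "maimai PLUS", "version": 11000},
--     {id: 2, "title": "GreeN", "version": 12000},
--     {id: 3, "title": "GreeN PLUS", "version": 13000},
--     {id: 4, "title": "ORANGE", "version": 14000},
--     {id: 5, "title": "ORANGE PLUS", "version": 15000},
--     {id: 6, "title": "PiNK", "version": 16000},
--     {id: 7, "title": "PiNK PLUS", "version": 17000},
--     {id: 8, "title": "MURASAKi", "version": 18000},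
--     {id: 9, "title": "MURASAKi PLUS", "version": 18500},
--     {id: 10, "title": "MiLK", "version": 19000},
--     {id: 11, "title": "MiLK PLUS", "version": 19500},
--     {id: 12, "title": "FiNALE", "version": 19900},
--     {id: 13, "title": "舞萌DX", "version": 20000},
--     {id: 15, "title": "舞萌DX 2021", "version": 21000},
--     {id: 17, "title": "舞萌DX 2022", "version": 22000},
--     {id: 19, "title": "舞萌DX 2023", "version": 23000},
-- ]
--
-- def get_version_name(version_code):
--     """
--     利用上面定义的版本信息查找对应的版本范围，并返回相应的版本名称
--     """
--     # 确保版本列表是按版本号排序的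
--     sorted_versions = sorted(versions, key=lambda x: x["version"])
--
--     for i, version in enumerate(sorted_versions):
--         # 如果是最后一个版本或版本号在当前和下一个版本之间
--         if (
--             i == len(sorted_versions) - 1
--             or version_code < sorted_versions[i + 1]["version"]
--         ):
--             return version["title"]
--
--     return "未知版本"  # 如果没有找到匹配的版本，返回未知版本
-- ===== SOURCE B (Python) =====
-- versions = [
--     {id: 0, "title": "maimai", "version": 10000},
--     {id: 1, "title": "maimai PLUS", "version": 11000},
--     {id: 2, "title": "GreeN", "version": 12000},
--     {id: 3, "title": "GreeN PLUS", "version": 13000},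
--     {id: 4, "title": "ORANGE", "version": 14000},
--     {id: 5, "title": "ORANGE PLUS", "version": 15000},
--     {id: 6, "title": "PiNK", "version": 16000},
--     {id: 7, "title": "PiNK PLUS", "version": 17000},
--     {id: 8, "title": "MURASAKi", "version": 18000},
--     {id: 9, "title": "MURASAKi PLUS", "version": 18500},
--     {id: 10, "title": "MiLK", "version": 19000},
--     {id: 11, "title": "MiLK PLUS", "version": 19500},
--     {id: 12, "title": "FiNALE", "version": 19900},
--     {id: 13, "title": "舞萌DX", "version": 20000},
--     {id: 15, "title": "舞萌DX 2021", "version": 21000},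
--     {id: 17, "title": "舞萌DX 2022", "version": 22000},
--     {id: 19, "title": "舞萌DX 2023", "version": 23000},
-- ]
--
--
-- def _bisect_right(a, x):
--     """bisect.bisect_right written out (A imports no modules)."""
--     lo, hi = 0, len(a)
--     while lo < hi:
--         mid = (lo + hi) // 2
--         if x < a[mid]:
--             hi = mid
--         else:
--             lo = mid + 1
--     return lo
--
--
-- def get_version_name(version_code):
--     sorted_versions = sorted(versions, key=lambda x: x["version"])
--     thresholds = [v["version"] for v in sorted_versions]
--     idx = _bisect_right(thresholds, version_code) - 1
--     if idx < 0:
--         idx = 0  # codes below the first threshold map to the first title, as in A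
--     return sorted_versions[idx]["title"]
-- ===== Notes on version B (the rewrite author's own statement) =====
-- stated objective: alternative
-- what changed: Replaces A's linear scan with lookahead over enumerate(sorted_versions) by a binary search (hand-written bisect_right) over a threshold table, indexing the answer directly with a clamped index.
import Mathlib
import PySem

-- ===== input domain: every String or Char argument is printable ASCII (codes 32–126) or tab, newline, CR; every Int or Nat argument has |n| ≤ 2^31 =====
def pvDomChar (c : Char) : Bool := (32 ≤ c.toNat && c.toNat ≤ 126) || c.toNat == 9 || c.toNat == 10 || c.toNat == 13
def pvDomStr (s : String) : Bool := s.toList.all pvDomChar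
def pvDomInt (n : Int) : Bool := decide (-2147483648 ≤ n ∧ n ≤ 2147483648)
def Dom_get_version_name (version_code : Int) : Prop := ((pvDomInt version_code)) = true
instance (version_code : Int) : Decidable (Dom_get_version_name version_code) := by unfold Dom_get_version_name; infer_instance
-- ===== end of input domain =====

-- B replaces A's linear lookahead scan with a binary search over a threshold table (alternative algorithm, same result).

-- ===== PORT A =====
-- each dict {id: i, "title": t, "version": v} is ported as the triple (i, t, v); the `id` field is never read
def pvVersions : List (Int × String × Int) :=
  [(0, "maimai", 10000), (1, "maimai PLUS", 11000), (2, "GreeN", 12000),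
   (3, "GreeN PLUS", 13000), (4, "ORANGE", 14000), (5, "ORANGE PLUS", 15000),
   (6, "PiNK", 16000), (7, "PiNK PLUS", 17000), (8, "MURASAKi", 18000),
   (9, "MURASAKi PLUS", 18500), (10, "MiLK", 19000), (11, "MiLK PLUS", 19500),
   (12, "FiNALE", 19900), (13, "舞萌DX", 20000), (15, "舞萌DX 2021", 21000),
   (17, "舞萌DX 2022", 22000), (19, "舞萌DX 2023", 23000)]

-- the for-loop over enumerate(sorted_versions); the lookahead sorted_versions[i+1]["version"] is only
-- consulted when i ≠ len-1, where it is in range, so pyGetD's default is never the decisive value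
def pvLoopA (version_code : Int) (sv : List (Int × String × Int)) :
    List (Int × (Int × String × Int)) → String
  | [] => "未知版本"
  | (i, ver) :: rest =>
      if i = PySem.List.len sv - 1 ∨
         version_code < (PySem.List.pyGetD sv (i + 1) (0, "", 0)).2.2 then
        ver.2.1
      else pvLoopA version_code sv rest

def get_version_name (version_code : Int) : String :=
  let sorted_versions := PySem.List.sorted pvVersions (fun x => x.2.2) false
  pvLoopA version_code sorted_versions (PySem.List.enumerate sorted_versions)

-- ===== PORT B =====
-- hand-written bisect_right from Source B; lo, hi, mid stay in [0, len a], so a[mid] is in range and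
-- List.getD equals Python's a[mid]
def pvBisectRight (a : List Int) (x : Int) (lo hi : Nat) : Nat :=
  if lo < hi then
    let mid := (lo + hi) / 2
    if x < a.getD mid 0 then pvBisectRight a x lo mid
    else pvBisectRight a x (mid + 1) hi
  else lo
termination_by hi - lo
decreasing_by all_goals omega

def get_version_name_alt (version_code : Int) : String :=
  let sorted_versions := PySem.List.sorted pvVersions (fun x => x.2.2) false
  let thresholds := sorted_versions.map (fun v => v.2.2)
  let idx : Int := (pvBisectRight thresholds version_code 0 thresholds.length : Int) - 1
  let idx := if idx < 0 then 0 else idx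
  (PySem.List.pyGetD sorted_versions idx (0, "", 0)).2.1

-- ===== PRECONDITION & SPEC =====
def Spec_get_version_name (version_code : Int) (out : String) : Prop := out = get_version_name_alt version_code
instance (version_code : Int) (out : String) : Decidable (Spec_get_version_name version_code out) := by unfold Spec_get_version_name; infer_instance

-- ===== CLAIM (what is proved, stated in full; the proofs are below) =====
def Claim_equal_get_version_name : Prop := ∀ (version_code : Int), Dom_get_version_name version_code → Spec_get_version_name version_code (get_version_name version_code)

-- ===== LEMMAS AND PROOFS =====
-- proof helpers: the titles, the bisection index as a decision tree, and the common closed form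
def pvTitles : List String :=
  ["maimai", "maimai PLUS", "GreeN", "GreeN PLUS", "ORANGE", "ORANGE PLUS", "PiNK",
   "PiNK PLUS", "MURASAKi", "MURASAKi PLUS", "MiLK", "MiLK PLUS", "FiNALE", "舞萌DX",
   "舞萌DX 2021", "舞萌DX 2022", "舞萌DX 2023"]

def pvIdx (v : Int) : Nat :=
  if v < 18000 then
    if v < 14000 then
      if v < 12000 then if v < 11000 then if v < 10000 then 0 else 1 else 2
      else if v < 13000 then 3 else 4
    else if v < 16000 then if v < 15000 then 5 else 6 else if v < 17000 then 7 else 8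
  else
    if v < 20000 then
      if v < 19500 then if v < 19000 then if v < 18500 then 9 else 10 else 11
      else if v < 19900 then 12 else 13
    else if v < 22000 then if v < 21000 then 14 else 15 else if v < 23000 then 16 else 17

def pvTable (v : Int) : String := pvTitles.getD (pvIdx v - 1) "maimai"

theorem pv_sorted_eq : PySem.List.sorted pvVersions (fun x => x.2.2) false = pvVersions := by
  decide

theorem pvIdx_le (v : Int) : pvIdx v ≤ 17 := by
  unfold pvIdx; split_ifs <;> decide

theorem pv_bisect_eq (v : Int) :
    pvBisectRight
      [10000, 11000, 12000, 13000, 14000, 15000, 16000, 17000, 18000, 18500, 19000, 19500,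
        19900, 20000, 21000, 22000, 23000] v 0 17 = pvIdx v := by
  unfold pvIdx
  repeat (rw [pvBisectRight]; norm_num)
  try rfl

set_option maxHeartbeats 1000000 in
theorem pv_A_eq (v : Int) : get_version_name v = pvTable v := by
  unfold get_version_name
  rw [pv_sorted_eq]
  norm_num [pvVersions, PySem.List.enumerate, pvLoopA,
    PySem.List.len, PySem.List.pyGetD, PySem.List.pyIdx?, PySem.List.pyGet?]
  simp only [Int.reduceToNat, List.getElem_cons_succ, List.getElem_cons_zero]
  simp only [pvTable]
  unfold pvIdx pvTitles
  rcases lt_or_ge v 10000 with h0 | h0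
  · simp only [(show (v < 10000) = True by simp; omega), (show (v < 11000) = True by simp; omega), (show (v < 12000) = True by simp; omega), (show (v < 13000) = True by simp; omega), (show (v < 14000) = True by simp; omega), (show (v < 15000) = True by simp; omega), (show (v < 16000) = True by simp; omega), (show (v < 17000) = True by simp; omega), (show (v < 18000) = True by simp; omega), (show (v < 18500) = True by simp; omega), (show (v < 19000) = True by simp; omega), (show (v < 19500) = True by simp; omega), (show (v < 19900) = True by simp; omega), (show (v < 20000) = True by simp; omega), (show (v < 21000) = True by simp; omega), (show (v < 22000) = True by simp; omega), (show (v < 23000) = True by simp; omega), if_true]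
    rfl
  rcases lt_or_ge v 11000 with h1 | h1
  · simp only [(show (v < 11000) = True by simp; omega), (show (v < 12000) = True by simp; omega), (show (v < 13000) = True by simp; omega), (show (v < 14000) = True by simp; omega), (show (v < 15000) = True by simp; omega), (show (v < 16000) = True by simp; omega), (show (v < 17000) = True by simp; omega), (show (v < 18000) = True by simp; omega), (show (v < 18500) = True by simp; omega), (show (v < 19000) = True by simp; omega), (show (v < 19500) = True by simp; omega), (show (v < 19900) = True by simp; omega), (show (v < 20000) = True by simp; omega), (show (v < 21000) = True by simp; omega), (show (v < 22000) = True by simp; omega), (show (v < 23000) = True by simp; omega), (show (v < 10000) = False by simp; omega), if_true, if_false]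
    rfl
  rcases lt_or_ge v 12000 with h2 | h2
  · simp only [(show (v < 12000) = True by simp; omega), (show (v < 13000) = True by simp; omega), (show (v < 14000) = True by simp; omega), (show (v < 15000) = True by simp; omega), (show (v < 16000) = True by simp; omega), (show (v < 17000) = True by simp; omega), (show (v < 18000) = True by simp; omega), (show (v < 18500) = True by simp; omega), (show (v < 19000) = True by simp; omega), (show (v < 19500) = True by simp; omega), (show (v < 19900) = True by simp; omega), (show (v < 20000) = True by simp; omega), (show (v < 21000) = True by simp; omega), (show (v < 22000) = True by simp; omega), (show (v < 23000) = True by simp; omega), (show (v < 10000) = False by simp; omega), (show (v < 11000) = False by simp; omega), if_true, if_false]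
    rfl
  rcases lt_or_ge v 13000 with h3 | h3
  · simp only [(show (v < 13000) = True by simp; omega), (show (v < 14000) = True by simp; omega), (show (v < 15000) = True by simp; omega), (show (v < 16000) = True by simp; omega), (show (v < 17000) = True by simp; omega), (show (v < 18000) = True by simp; omega), (show (v < 18500) = True by simp; omega), (show (v < 19000) = True by simp; omega), (show (v < 19500) = True by simp; omega), (show (v < 19900) = True by simp; omega), (show (v < 20000) = True by simp; omega), (show (v < 21000) = True by simp; omega), (show (v < 22000) = True by simp; omega), (show (v < 23000) = True by simp; omega), (show (v < 10000) = False by simp; omega), (show (v < 11000) = False by simp; omega), (show (v < 12000) = False by simp; omega), if_true, if_false]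
    rfl
  rcases lt_or_ge v 14000 with h4 | h4
  · simp only [(show (v < 14000) = True by simp; omega), (show (v < 15000) = True by simp; omega), (show (v < 16000) = True by simp; omega), (show (v < 17000) = True by simp; omega), (show (v < 18000) = True by simp; omega), (show (v < 18500) = True by simp; omega), (show (v < 19000) = True by simp; omega), (show (v < 19500) = True by simp; omega), (show (v < 19900) = True by simp; omega), (show (v < 20000) = True by simp; omega), (show (v < 21000) = True by simp; omega), (show (v < 22000) = True by simp; omega), (show (v < 23000) = True by simp; omega), (show (v < 10000) = False by simp; omega), (show (v < 11000) = False by simp; omega), (show (v < 12000) = False by simp; omega), (show (v < 13000) = False by simp; omega), if_true, if_false]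
    rfl
  rcases lt_or_ge v 15000 with h5 | h5
  · simp only [(show (v < 15000) = True by simp; omega), (show (v < 16000) = True by simp; omega), (show (v < 17000) = True by simp; omega), (show (v < 18000) = True by simp; omega), (show (v < 18500) = True by simp; omega), (show (v < 19000) = True by simp; omega), (show (v < 19500) = True by simp; omega), (show (v < 19900) = True by simp; omega), (show (v < 20000) = True by simp; omega), (show (v < 21000) = True by simp; omega), (show (v < 22000) = True by simp; omega), (show (v < 23000) = True by simp; omega), (show (v < 10000) = False by simp; omega), (show (v < 11000) = False by simp; omega), (show (v < 12000) = False by simp; omega), (show (v < 13000) = False by simp; omega), (show (v < 14000) = False by simp; omega), if_true, if_false]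
    rfl
  rcases lt_or_ge v 16000 with h6 | h6
  · simp only [(show (v < 16000) = True by simp; omega), (show (v < 17000) = True by simp; omega), (show (v < 18000) = True by simp; omega), (show (v < 18500) = True by simp; omega), (show (v < 19000) = True by simp; omega), (show (v < 19500) = True by simp; omega), (show (v < 19900) = True by simp; omega), (show (v < 20000) = True by simp; omega), (show (v < 21000) = True by simp; omega), (show (v < 22000) = True by simp; omega), (show (v < 23000) = True by simp; omega), (show (v < 10000) = False by simp; omega), (show (v < 11000) = False by simp; omega), (show (v < 12000) = False by simp; omega), (show (v < 13000) = False by simp; omega), (show (v < 14000) = False by simp; omega), (show (v < 15000) = False by simp; omega), if_true, if_false]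
    rfl
  rcases lt_or_ge v 17000 with h7 | h7
  · simp only [(show (v < 17000) = True by simp; omega), (show (v < 18000) = True by simp; omega), (show (v < 18500) = True by simp; omega), (show (v < 19000) = True by simp; omega), (show (v < 19500) = True by simp; omega), (show (v < 19900) = True by simp; omega), (show (v < 20000) = True by simp; omega), (show (v < 21000) = True by simp; omega), (show (v < 22000) = True by simp; omega), (show (v < 23000) = True by simp; omega), (show (v < 10000) = False by simp; omega), (show (v < 11000) = False by simp; omega), (show (v < 12000) = False by simp; omega), (show (v < 13000) = False by simp; omega), (show (v < 14000) = False by simp; omega), (show (v < 15000) = False by simp; omega), (show (v < 16000) = False by simp; omega), if_true, if_false]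
    rfl
  rcases lt_or_ge v 18000 with h8 | h8
  · simp only [(show (v < 18000) = True by simp; omega), (show (v < 18500) = True by simp; omega), (show (v < 19000) = True by simp; omega), (show (v < 19500) = True by simp; omega), (show (v < 19900) = True by simp; omega), (show (v < 20000) = True by simp; omega), (show (v < 21000) = True by simp; omega), (show (v < 22000) = True by simp; omega), (show (v < 23000) = True by simp; omega), (show (v < 10000) = False by simp; omega), (show (v < 11000) = False by simp; omega), (show (v < 12000) = False by simp; omega), (show (v < 13000) = False by simp; omega), (show (v < 14000) = False by simp; omega), (show (v < 15000) = False by simp; omega), (show (v < 16000) = False by simp; omega), (show (v < 17000) = False by simp; omega), if_true, if_false]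
    rfl
  rcases lt_or_ge v 18500 with h9 | h9
  · simp only [(show (v < 18500) = True by simp; omega), (show (v < 19000) = True by simp; omega), (show (v < 19500) = True by simp; omega), (show (v < 19900) = True by simp; omega), (show (v < 20000) = True by simp; omega), (show (v < 21000) = True by simp; omega), (show (v < 22000) = True by simp; omega), (show (v < 23000) = True by simp; omega), (show (v < 10000) = False by simp; omega), (show (v < 11000) = False by simp; omega), (show (v < 12000) = False by simp; omega), (show (v < 13000) = False by simp; omega), (show (v < 14000) = False by simp; omega), (show (v < 15000) = False by simp; omega), (show (v < 16000) = False by simp; omega), (show (v < 17000) = False by simp; omega), (show (v < 18000) = False by simp; omega), if_true, if_false]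
    rfl
  rcases lt_or_ge v 19000 with h10 | h10
  · simp only [(show (v < 19000) = True by simp; omega), (show (v < 19500) = True by simp; omega), (show (v < 19900) = True by simp; omega), (show (v < 20000) = True by simp; omega), (show (v < 21000) = True by simp; omega), (show (v < 22000) = True by simp; omega), (show (v < 23000) = True by simp; omega), (show (v < 10000) = False by simp; omega), (show (v < 11000) = False by simp; omega), (show (v < 12000) = False by simp; omega), (show (v < 13000) = False by simp; omega), (show (v < 14000) = False by simp; omega), (show (v < 15000) = False by simp; omega), (show (v < 16000) = False by simp; omega), (show (v < 17000) = False by simp; omega), (show (v < 18000) = False by simp; omega), (show (v < 18500) = False by simp; omega), if_true, if_false]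
    rfl
  rcases lt_or_ge v 19500 with h11 | h11
  · simp only [(show (v < 19500) = True by simp; omega), (show (v < 19900) = True by simp; omega), (show (v < 20000) = True by simp; omega), (show (v < 21000) = True by simp; omega), (show (v < 22000) = True by simp; omega), (show (v < 23000) = True by simp; omega), (show (v < 10000) = False by simp; omega), (show (v < 11000) = False by simp; omega), (show (v < 12000) = False by simp; omega), (show (v < 13000) = False by simp; omega), (show (v < 14000) = False by simp; omega), (show (v < 15000) = False by simp; omega), (show (v < 16000) = False by simp; omega), (show (v < 17000) = False by simp; omega), (show (v < 18000) = False by simp; omega), (show (v < 18500) = False by simp; omega), (show (v < 19000) = False by simp; omega), if_true, if_false]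
    rfl
  rcases lt_or_ge v 19900 with h12 | h12
  · simp only [(show (v < 19900) = True by simp; omega), (show (v < 20000) = True by simp; omega), (show (v < 21000) = True by simp; omega), (show (v < 22000) = True by simp; omega), (show (v < 23000) = True by simp; omega), (show (v < 10000) = False by simp; omega), (show (v < 11000) = False by simp; omega), (show (v < 12000) = False by simp; omega), (show (v < 13000) = False by simp; omega), (show (v < 14000) = False by simp; omega), (show (v < 15000) = False by simp; omega), (show (v < 16000) = False by simp; omega), (show (v < 17000) = False by simp; omega), (show (v < 18000) = False by simp; omega), (show (v < 18500) = False by simp; omega), (show (v < 19000) = False by simp; omega), (show (v < 19500) = False by simp; omega), if_true, if_false]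
    rfl
  rcases lt_or_ge v 20000 with h13 | h13
  · simp only [(show (v < 20000) = True by simp; omega), (show (v < 21000) = True by simp; omega), (show (v < 22000) = True by simp; omega), (show (v < 23000) = True by simp; omega), (show (v < 10000) = False by simp; omega), (show (v < 11000) = False by simp; omega), (show (v < 12000) = False by simp; omega), (show (v < 13000) = False by simp; omega), (show (v < 14000) = False by simp; omega), (show (v < 15000) = False by simp; omega), (show (v < 16000) = False by simp; omega), (show (v < 17000) = False by simp; omega), (show (v < 18000) = False by simp; omega), (show (v < 18500) = False by simp; omega), (show (v < 19000) = False by simp; omega), (show (v < 19500) = False by simp; omega), (show (v < 19900) = False by simp; omega), if_true, if_false]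
    rfl
  rcases lt_or_ge v 21000 with h14 | h14
  · simp only [(show (v < 21000) = True by simp; omega), (show (v < 22000) = True by simp; omega), (show (v < 23000) = True by simp; omega), (show (v < 10000) = False by simp; omega), (show (v < 11000) = False by simp; omega), (show (v < 12000) = False by simp; omega), (show (v < 13000) = False by simp; omega), (show (v < 14000) = False by simp; omega), (show (v < 15000) = False by simp; omega), (show (v < 16000) = False by simp; omega), (show (v < 17000) = False by simp; omega), (show (v < 18000) = False by simp; omega), (show (v < 18500) = False by simp; omega), (show (v < 19000) = False by simp; omega), (show (v < 19500) = False by simp; omega), (show (v < 19900) = False by simp; omega), (show (v < 20000) = False by simp; omega), if_true, if_false]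
    rfl
  rcases lt_or_ge v 22000 with h15 | h15
  · simp only [(show (v < 22000) = True by simp; omega), (show (v < 23000) = True by simp; omega), (show (v < 10000) = False by simp; omega), (show (v < 11000) = False by simp; omega), (show (v < 12000) = False by simp; omega), (show (v < 13000) = False by simp; omega), (show (v < 14000) = False by simp; omega), (show (v < 15000) = False by simp; omega), (show (v < 16000) = False by simp; omega), (show (v < 17000) = False by simp; omega), (show (v < 18000) = False by simp; omega), (show (v < 18500) = False by simp; omega), (show (v < 19000) = False by simp; omega), (show (v < 19500) = False by simp; omega), (show (v < 19900) = False by simp; omega), (show (v < 20000) = False by simp; omega), (show (v < 21000) = False by simp; omega), if_true, if_false]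
    rfl
  rcases lt_or_ge v 23000 with h16 | h16
  · simp only [(show (v < 23000) = True by simp; omega), (show (v < 10000) = False by simp; omega), (show (v < 11000) = False by simp; omega), (show (v < 12000) = False by simp; omega), (show (v < 13000) = False by simp; omega), (show (v < 14000) = False by simp; omega), (show (v < 15000) = False by simp; omega), (show (v < 16000) = False by simp; omega), (show (v < 17000) = False by simp; omega), (show (v < 18000) = False by simp; omega), (show (v < 18500) = False by simp; omega), (show (v < 19000) = False by simp; omega), (show (v < 19500) = False by simp; omega), (show (v < 19900) = False by simp; omega), (show (v < 20000) = False by simp; omega), (show (v < 21000) = False by simp; omega), (show (v < 22000) = False by simp; omega), if_true, if_false]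
    rfl
  simp only [(show (v < 10000) = False by simp; omega), (show (v < 11000) = False by simp; omega), (show (v < 12000) = False by simp; omega), (show (v < 13000) = False by simp; omega), (show (v < 14000) = False by simp; omega), (show (v < 15000) = False by simp; omega), (show (v < 16000) = False by simp; omega), (show (v < 17000) = False by simp; omega), (show (v < 18000) = False by simp; omega), (show (v < 18500) = False by simp; omega), (show (v < 19000) = False by simp; omega), (show (v < 19500) = False by simp; omega), (show (v < 19900) = False by simp; omega), (show (v < 20000) = False by simp; omega), (show (v < 21000) = False by simp; omega), (show (v < 22000) = False by simp; omega), (show (v < 23000) = False by simp; omega), if_false]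
  rfl


set_option maxHeartbeats 1000000 in
theorem pv_B_eq (v : Int) : get_version_name_alt v = pvTable v := by
  unfold get_version_name_alt
  rw [pv_sorted_eq]
  norm_num [pvVersions, PySem.List.enumerate,
    PySem.List.len, PySem.List.pyGetD, PySem.List.pyIdx?, PySem.List.pyGet?]
  have hk := pv_bisect_eq v
  generalize hgen : pvBisectRight
      [10000, 11000, 12000, 13000, 14000, 15000, 16000, 17000, 18000, 18500, 19000, 19500,
        19900, 20000, 21000, 22000, 23000] v 0 17 = k at hk ⊢
  have hk17 : k ≤ 17 := hk ▸ pvIdx_le v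
  simp only [pvTable]
  rw [← hk]
  clear hgen hk
  interval_cases k <;> rfl

-- ===== VERDICT (by name: the statement is the Claim_ definition above) =====
theorem get_version_name_spec : Claim_equal_get_version_name := by
  intro v _
  unfold Spec_get_version_name
  rw [pv_A_eq, pv_B_eq]
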